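-- pv_equiv track=rewrite | github.com/daenu71/IWAS | src/core/models.py | _merge_known_keys
-- ===== SOURCE A (Python) =====
-- from typing import Any
--
-- def _merge_known_keys(existing: Any, known: dict[str, Any]) -> tuple[dict[str, Any], bool]:
--     out = dict(existing) if isinstance(existing, dict) else {}
--     changed = not isinstance(existing, dict)
--     for k, v in known.items():
--         if out.get(k) != v:
--             out[k] = v
--             changed = True
--     return out, changed
-- ===== SOURCE B (Python) =====
-- def _merge_known_keys(existing, known):
--     base = dict(existing) if isinstance(existing, dict) else {}
--     merged = {**base, **known}
--     changed = (not isinstance(existing, dict)) or (merged != base)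
--     return merged, changed
-- ===== Notes on version B (the rewrite author's own statement) =====
-- stated objective: simpler
-- what changed: Replaces A's per-key accumulator loop (conditional insert + changed flag updated key by key) with a bulk dict merge {**base, **known} and a single whole-dict comparison to derive the changed flag.
import Mathlib
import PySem

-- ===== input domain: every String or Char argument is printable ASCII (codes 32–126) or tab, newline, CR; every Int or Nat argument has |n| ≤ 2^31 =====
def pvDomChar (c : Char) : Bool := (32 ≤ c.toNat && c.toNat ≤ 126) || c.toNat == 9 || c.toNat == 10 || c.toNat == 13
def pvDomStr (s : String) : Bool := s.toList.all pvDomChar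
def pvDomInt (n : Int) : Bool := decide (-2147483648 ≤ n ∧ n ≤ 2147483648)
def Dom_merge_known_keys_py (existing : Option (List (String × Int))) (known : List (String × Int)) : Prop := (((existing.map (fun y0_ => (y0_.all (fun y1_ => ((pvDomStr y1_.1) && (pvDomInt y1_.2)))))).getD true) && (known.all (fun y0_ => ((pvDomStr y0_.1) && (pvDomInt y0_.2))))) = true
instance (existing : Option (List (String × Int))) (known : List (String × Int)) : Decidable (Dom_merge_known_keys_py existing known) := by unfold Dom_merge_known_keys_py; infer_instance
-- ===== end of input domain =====

-- B replaces A's per-key conditional-insert loop with a bulk dict merge and a single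
-- whole-dict comparison for the changed flag; objective: simpler (same return value).

-- ===== PORT A =====
-- the loop body: 'if out.get(k) != v: out[k] = v; changed = True'
def pvLoopA (st : PySem.Dict String Int × Bool) (kv : String × Int) : PySem.Dict String Int × Bool :=
  if st.1.get? kv.1 ≠ some kv.2 then (st.1.insert kv.1 kv.2, true) else st

def merge_known_keys_py (existing : Option (List (String × Int))) (known : List (String × Int)) : (List (String × Int)) × Bool :=
  -- out = dict(existing) if isinstance(existing, dict) else {}
  let out0 : PySem.Dict String Int :=
    match existing with
    | some l => PySem.Dict.ofList l
    | none => PySem.Dict.empty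
  -- changed = not isinstance(existing, dict)
  let changed0 : Bool := existing.isNone
  -- for k, v in known.items(): …   (known arrives as a dict: ofList)
  let res := (PySem.Dict.ofList known).items.foldl pvLoopA (out0, changed0)
  (res.1.items, res.2)

-- ===== PORT B =====
def merge_known_keys_py_alt (existing : Option (List (String × Int))) (known : List (String × Int)) : (List (String × Int)) × Bool :=
  -- base = dict(existing) if isinstance(existing, dict) else {}
  let base : PySem.Dict String Int :=
    match existing with
    | some l => PySem.Dict.ofList l
    | none => PySem.Dict.empty
  -- merged = {**base, **known}
  let merged : PySem.Dict String Int := base.update (PySem.Dict.ofList known).items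
  -- changed = (not isinstance(existing, dict)) or (merged != base)
  -- merged's keys extend base's keys in place, so Python's order-insensitive dict != coincides
  -- with inequality of the items lists here (exact on these operands)
  let changed : Bool := existing.isNone || decide (merged.items ≠ base.items)
  (merged.items, changed)

-- ===== PRECONDITION & SPEC =====
def Spec_merge_known_keys_py (existing : Option (List (String × Int))) (known : List (String × Int)) (out : (List (String × Int)) × Bool) : Prop := out = merge_known_keys_py_alt existing known
instance (existing : Option (List (String × Int))) (known : List (String × Int)) (out : (List (String × Int)) × Bool) : Decidable (Spec_merge_known_keys_py existing known out) := by unfold Spec_merge_known_keys_py; infer_instance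

-- ===== CLAIM (what is proved, stated in full; the proofs are below) =====
def Claim_equal_merge_known_keys_py : Prop := ∀ (existing : Option (List (String × Int))) (known : List (String × Int)), Dom_merge_known_keys_py existing known → Spec_merge_known_keys_py existing known (merge_known_keys_py existing known)

-- ===== LEMMAS AND PROOFS =====

-- inserting a key with the value it already has is the identity
lemma insert_eq_self_of_get? (d : PySem.Dict String Int) (k : String) (v : Int)
    (hnd : (PySem.Dict.keys d).Nodup) (h : d.get? k = some v) : d.insert k v = d := by
  apply PySem.Dict.ext
  have hc : d.contains k = true := by
    rw [PySem.Dict.contains_eq_isSome_get?, h]; rfl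
  rw [PySem.Dict.items_insert_of_contains d v hc]
  have hfix : ∀ p ∈ d.items, (if (p.1 == k) = true then (k, v) else p) = p := by
    intro p hp
    by_cases hk : p.1 = k
    · have hv := PySem.Dict.get?_of_mem_items d (k := p.1) (v := p.2) hp hnd
      rw [hk, h] at hv
      have hv2 : v = p.2 := by injection hv
      subst hk
      simp [hv2]
    · simp [hk]
  rw [List.map_congr_left (g := id) hfix, List.map_id]

-- updating with pairs whose keys avoid k does not change the lookup at k
lemma get?_update_of_not_mem (L : List (String × Int)) (d : PySem.Dict String Int) (k : String)
    (h : k ∉ L.map Prod.fst) : (d.update L).get? k = d.get? k := by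
  induction L generalizing d with
  | nil => rfl
  | cons p L ih =>
      simp only [List.map_cons, List.mem_cons, not_or] at h
      show ((d.insert p.1 p.2).update L).get? k = d.get? k
      rw [ih _ h.2, PySem.Dict.get?_insert_of_ne d p.2 h.1]

-- A's loop over a duplicate-free key list is B's bulk update, and the flag records
-- exactly whether the update changed the dict
lemma loopA_eq (L : List (String × Int)) (d : PySem.Dict String Int) (c : Bool)
    (hnd : (PySem.Dict.keys d).Nodup) (hL : (L.map Prod.fst).Nodup) :
    L.foldl pvLoopA (d, c) = (d.update L, c || decide ((d.update L).items ≠ d.items)) := by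
  induction L generalizing d c with
  | nil => simp [PySem.Dict.update]
  | cons p L ih =>
      simp only [List.map_cons, List.nodup_cons] at hL
      have hupd : d.update (p :: L) = (d.insert p.1 p.2).update L := rfl
      by_cases h : d.get? p.1 = some p.2
      · have hins : d.insert p.1 p.2 = d := insert_eq_self_of_get? d p.1 p.2 hnd h
        have hstep : pvLoopA (d, c) p = (d, c) := by simp [pvLoopA, h]
        rw [List.foldl_cons, hstep, ih d c hnd hL.2, hupd, hins]
      · have hstep : pvLoopA (d, c) p = (d.insert p.1 p.2, true) := by simp [pvLoopA, h]
        have hne : (d.update (p :: L)).items ≠ d.items := by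
          intro heq
          have hdeq : d.update (p :: L) = d := PySem.Dict.ext heq
          have hget : (d.update (p :: L)).get? p.1 = d.get? p.1 := by rw [hdeq]
          rw [hupd, get?_update_of_not_mem L _ p.1 hL.1,
            PySem.Dict.get?_insert_self] at hget
          exact h hget.symm
        rw [List.foldl_cons, hstep,
          ih (d.insert p.1 p.2) true (PySem.Dict.nodup_keys_insert _ _ _ hnd) hL.2, ← hupd]
        simp [hne]

-- ===== VERDICT (by name: the statement is the Claim_ definition above) =====
theorem merge_known_keys_py_spec : Claim_equal_merge_known_keys_py := by
  intro existing known _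
  unfold Spec_merge_known_keys_py merge_known_keys_py merge_known_keys_py_alt
  have hL : ((PySem.Dict.ofList known).items.map Prod.fst).Nodup := by
    simpa [PySem.Dict.keys] using PySem.Dict.nodup_keys_ofList (κ := String) (ν := Int) known
  cases existing with
  | none =>
      show (((PySem.Dict.ofList known).items.foldl pvLoopA (PySem.Dict.empty, true)).1.items,
            ((PySem.Dict.ofList known).items.foldl pvLoopA (PySem.Dict.empty, true)).2) = _
      rw [loopA_eq _ _ _ PySem.Dict.nodup_keys_empty hL]; rfl
  | some l =>
      show (((PySem.Dict.ofList known).items.foldl pvLoopA (PySem.Dict.ofList l, false)).1.items,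
            ((PySem.Dict.ofList known).items.foldl pvLoopA (PySem.Dict.ofList l, false)).2) = _
      rw [loopA_eq _ _ _ (PySem.Dict.nodup_keys_ofList l) hL]; rfl
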